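-- pv_equiv track=rewrite | github.com/Alexander104-hub/library_project | app/utils/utils.py | get_word_combinations
-- ===== SOURCE A (Python) =====
-- import itertools
--
-- NWORDS_IN_COMBINATION = 3
--
-- def get_word_combinations(sentence:list[str], nwords_in_combination=NWORDS_IN_COMBINATION):
--     word_combinations = []
--     if len(sentence) <= nwords_in_combination:
--         for L in range(1, len(sentence) + 1):
--             word_combinations += list(itertools.combinations(sentence, L))
--         # return [subset for subset in itertools.combinations(sentence, len(sentence))]
--         return word_combinations
--     for i in range(len(sentence) - nwords_in_combination + 1):
--         for L in range(1, nwords_in_combination + 1):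
--             for subset in itertools.combinations(sentence[i:(i+nwords_in_combination)], L):
--                 if subset not in word_combinations:
--                     word_combinations.append(subset)
--     return word_combinations
-- ===== SOURCE B (Python) =====
-- import itertools
--
-- NWORDS_IN_COMBINATION = 3
--
-- def get_word_combinations(sentence, nwords_in_combination=NWORDS_IN_COMBINATION):
--     n = nwords_in_combination
--     if len(sentence) <= n:
--         return [c for L in range(1, len(sentence) + 1)
--                   for c in itertools.combinations(sentence, L)]
--     # Incremental sliding window: the first window contributes all of its
--     # combinations; every later window contributes only the combinations that
--     # end at its new last word (the rest were already produced by the previous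
--     # window).  A single ordered dedup pass then removes value collisions.
--     raw = [c for L in range(1, n + 1)
--              for c in itertools.combinations(sentence[:n], L)]
--     for end in range(n, len(sentence)):
--         prev = sentence[end - n + 1:end]
--         for L in range(1, n + 1):
--             for c in itertools.combinations(prev, L - 1):
--                 raw.append(c + (sentence[end],))
--     return list(dict.fromkeys(raw))
-- ===== Notes on version B (the rewrite author's own statement) =====
-- stated objective: alternative
-- what changed: A regenerates every combination of every sliding window and rescans the output list before each append; B generates each window's combinations incrementally (the first window fully, each later window only the combinations ending at its newly entering word, since the rest were produced by the previous window) and removes remaining value collisions in one final ordered dedup pass with dict.fromkeys.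
import Mathlib
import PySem

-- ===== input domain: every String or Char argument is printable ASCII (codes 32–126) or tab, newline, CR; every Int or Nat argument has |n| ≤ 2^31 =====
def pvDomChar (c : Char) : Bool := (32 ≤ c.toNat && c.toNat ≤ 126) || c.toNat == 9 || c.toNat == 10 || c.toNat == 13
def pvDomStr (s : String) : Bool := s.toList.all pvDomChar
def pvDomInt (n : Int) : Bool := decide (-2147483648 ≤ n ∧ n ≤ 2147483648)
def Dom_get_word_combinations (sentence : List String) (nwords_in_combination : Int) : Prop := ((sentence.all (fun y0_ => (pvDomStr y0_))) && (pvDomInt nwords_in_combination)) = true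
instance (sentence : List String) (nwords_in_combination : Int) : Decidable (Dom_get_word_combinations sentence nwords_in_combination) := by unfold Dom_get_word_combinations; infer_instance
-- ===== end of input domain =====

-- B replaces A's regenerate-every-window-and-scan scheme by an incremental sliding window:
-- only the first window contributes all its combinations, every later window contributes only
-- the combinations ending at its new last word, followed by one ordered dedup pass ('alternative').

-- itertools.combinations(xs, k), in itertools' lexicographic-by-index order
def pvCombs : Nat → List String → List (List String)
  | 0, _ => [[]]
  | _ + 1, [] => []
  | k + 1, x :: xs => (pvCombs k xs).map (fun c => x :: c) ++ pvCombs (k + 1) xs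

-- ===== PORT A =====
def get_word_combinations (sentence : List String) (nwords_in_combination : Int) : List (List String) :=
  if (sentence.length : Int) ≤ nwords_in_combination then
    (PySem.List.pyRange 1 ((sentence.length : Int) + 1) 1).foldl
      (fun word_combinations L => word_combinations ++ pvCombs L.toNat sentence) []
  else
    (PySem.List.pyRange 0 ((sentence.length : Int) - nwords_in_combination + 1) 1).foldl
      (fun word_combinations i =>
        (PySem.List.pyRange 1 (nwords_in_combination + 1) 1).foldl
          (fun word_combinations L =>
            (pvCombs L.toNat (PySem.List.slice sentence (some i) (some (i + nwords_in_combination)))).foldl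
              (fun word_combinations subset =>
                if !(word_combinations.contains subset) then word_combinations ++ [subset]
                else word_combinations)
              word_combinations)
          word_combinations)
      []

-- ===== PORT B =====
def get_word_combinations_alt (sentence : List String) (nwords_in_combination : Int) : List (List String) :=
  if (sentence.length : Int) ≤ nwords_in_combination then
    (PySem.List.pyRange 1 ((sentence.length : Int) + 1) 1).flatMap
      (fun L => pvCombs L.toNat sentence)
  else
    let raw0 :=
      (PySem.List.pyRange 1 (nwords_in_combination + 1) 1).flatMap
        (fun L => pvCombs L.toNat (PySem.List.slice sentence none (some nwords_in_combination)))
    let raw :=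
      (PySem.List.pyRange nwords_in_combination (sentence.length : Int) 1).foldl
        (fun raw e =>
          let prev := PySem.List.slice sentence (some (e - nwords_in_combination + 1)) (some e)
          (PySem.List.pyRange 1 (nwords_in_combination + 1) 1).foldl
            (fun raw L =>
              (pvCombs (L - 1).toNat prev).foldl
                (fun raw c => raw ++ [c ++ [PySem.List.pyGetD sentence e ""]]) raw)
            raw)
        raw0
    PySem.List.dedup raw

-- ===== PRECONDITION & SPEC =====
def Spec_get_word_combinations (sentence : List String) (nwords_in_combination : Int) (out : List (List String)) : Prop := out = get_word_combinations_alt sentence nwords_in_combination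
instance (sentence : List String) (nwords_in_combination : Int) (out : List (List String)) : Decidable (Spec_get_word_combinations sentence nwords_in_combination out) := by unfold Spec_get_word_combinations; infer_instance

-- ===== CLAIM (what is proved, stated in full; the proofs are below) =====
def Claim_equal_get_word_combinations : Prop := ∀ (sentence : List String) (nwords_in_combination : Int), Dom_get_word_combinations sentence nwords_in_combination → Spec_get_word_combinations sentence nwords_in_combination (get_word_combinations sentence nwords_in_combination)

-- ===== LEMMAS AND PROOFS =====

-- window j of width n' (sentence[j:j+n'])
def pvWin (s : List String) (n' j : Nat) : List String := (s.drop j).take n'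
-- the L-range both programs iterate: range(1, n+1)
def pvLs (n : Int) : List Int := PySem.List.pyRange 1 (n + 1) 1
-- A's full combination stream of window j
def pvWS (s : List String) (n : Int) (j : Nat) : List (List String) :=
  (pvLs n).flatMap (fun L => pvCombs L.toNat (pvWin s n.toNat j))
-- B's incremental stream at window j+1: combinations ending at the new word
def pvNew (s : List String) (n : Int) (j : Nat) : List (List String) :=
  (pvLs n).flatMap (fun L =>
    (pvCombs (L - 1).toNat (pvWin s (n.toNat - 1) (j + 1))).map
      (fun c => c ++ [PySem.List.pyGetD s (n + (j : Int)) ""]))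

theorem pv_add_of_contains (a : List (List String)) (x : List String)
    (h : a.contains x = true) : PySem.Set.add a x = a := by
  have hx : x ∈ a := by simpa using h
  simp [PySem.Set.add, PySem.Set.contains, hx]

theorem pv_contains_add (a : List (List String)) (x y : List String)
    (h : a.contains x = true) : (PySem.Set.add a y).contains x = true := by
  simp only [PySem.Set.add, PySem.Set.contains]
  split <;> simp_all

theorem pv_contains_add_self (a : List (List String)) (x : List String) :
    (PySem.Set.add a x).contains x = true := by
  simp only [PySem.Set.add, PySem.Set.contains]
  split <;> simp_all

theorem pv_contains_foldl (f : List String → List String) :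
    ∀ (l : List (List String)) (a : List (List String)) (x : List String),
      a.contains x = true →
      (l.foldl (fun a c => PySem.Set.add a (f c)) a).contains x = true := by
  intro l
  induction l with
  | nil => intro a x h; simpa using h
  | cons y t ih =>
    intro a x h
    exact ih (PySem.Set.add a (f y)) x (pv_contains_add a x (f y) h)

theorem pv_contains_foldl_self (f : List String → List String) :
    ∀ (l : List (List String)) (a : List (List String)) (c : List String),
      c ∈ l →
      (l.foldl (fun a c => PySem.Set.add a (f c)) a).contains (f c) = true := by
  intro l
  induction l with
  | nil => intro _ _ h; cases h
  | cons y t ih =>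
    intro a c hc
    rcases List.mem_cons.mp hc with h | h
    · subst h
      exact pv_contains_foldl f t _ _ (pv_contains_add_self a (f c))
    · exact ih _ c h

theorem pv_mem_combs_cons_left (x : String) (k : Nat) (xs : List String)
    (c : List String) (h : c ∈ pvCombs k xs) : x :: c ∈ pvCombs (k + 1) (x :: xs) := by
  show x :: c ∈ (pvCombs k xs).map (fun c => x :: c) ++ pvCombs (k + 1) xs
  exact List.mem_append_left _ (List.mem_map_of_mem h)

theorem pv_mem_combs_cons (x : String) :
    ∀ (k : Nat) (xs : List String) (c : List String),
      c ∈ pvCombs k xs → c ∈ pvCombs k (x :: xs) := by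
  intro k xs c h
  match k with
  | 0 => simpa [pvCombs] using h
  | k + 1 =>
    show c ∈ (pvCombs k xs).map (fun c => x :: c) ++ pvCombs (k + 1) xs
    exact List.mem_append_right _ h

-- the key combinatorial step: folding PySem.Set.add over the combinations of
-- w' ++ [z] is the same as folding only over the combinations ending in z,
-- provided every combination of w' is already in the accumulator
theorem pv_comb_step (z : String) :
    ∀ (ys : List String) (k : Nat) (f : List String → List String)
      (acc : List (List String)),
      (∀ c ∈ pvCombs (k + 1) ys, acc.contains (f c) = true) →
      (pvCombs (k + 1) (ys ++ [z])).foldl (fun a c => PySem.Set.add a (f c)) acc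
        = ((pvCombs k ys).map (fun c => c ++ [z])).foldl
            (fun a c => PySem.Set.add a (f c)) acc := by
  intro ys
  induction ys with
  | nil =>
    intro k f acc _
    match k with
    | 0 => simp [pvCombs]
    | k + 1 => simp [pvCombs]
  | cons y t ih =>
    intro k f acc hacc
    match k with
    | 0 =>
      have h1 : pvCombs 1 ((y :: t) ++ [z]) = [y] :: pvCombs 1 (t ++ [z]) := by
        simp [pvCombs]
      have h2 : PySem.Set.add acc (f [y]) = acc :=
        pv_add_of_contains acc (f [y])
          (hacc [y] (by show [y] ∈ (pvCombs 0 t).map (fun c => y :: c) ++ pvCombs 1 t; simp [pvCombs]))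
      rw [h1]
      simp only [List.foldl_cons, h2]
      rw [ih 0 f acc (fun c hc => hacc c (by
        show c ∈ (pvCombs 0 t).map (fun c => y :: c) ++ pvCombs 1 t
        exact List.mem_append_right _ hc))]
      simp [pvCombs]
    | k + 1 =>
      have hsplit : pvCombs (k + 2) ((y :: t) ++ [z])
          = (pvCombs (k + 1) (t ++ [z])).map (fun c => y :: c)
            ++ pvCombs (k + 2) (t ++ [z]) := rfl
      have hsplit2 : pvCombs (k + 1) (y :: t)
          = (pvCombs k t).map (fun c => y :: c) ++ pvCombs (k + 1) t := rfl
      rw [hsplit, List.foldl_append, List.foldl_map]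
      have hfirst := ih k (fun c => f (y :: c)) acc (fun c hc =>
        hacc (y :: c) (pv_mem_combs_cons_left y (k + 1) t c hc))
      rw [hfirst]
      set acc1 := ((pvCombs k t).map (fun c => c ++ [z])).foldl
        (fun a c => PySem.Set.add a (f (y :: c))) acc with hacc1
      have hsecond := ih (k + 1) f acc1 (fun c hc => by
        rw [hacc1]
        exact pv_contains_foldl _ _ _ _ (hacc c (pv_mem_combs_cons y (k + 1 + 1) t c hc)))
      rw [hsecond, hsplit2, List.map_append, List.foldl_append, List.map_map, List.foldl_map]
      simp only [List.foldl_map, Function.comp, List.cons_append, hacc1]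

-- lifting pv_comb_step through the flatMap over the L-range
theorem pv_window_step (z : String) (w' : List String) :
    ∀ (ls : List Int) (acc : List (List String)),
      (∀ L ∈ ls, 1 ≤ L) →
      (∀ L ∈ ls, ∀ c ∈ pvCombs L.toNat w', acc.contains c = true) →
      ((ls.flatMap (fun L => pvCombs L.toNat (w' ++ [z]))).foldl PySem.Set.add acc)
        = ((ls.flatMap (fun L =>
              (pvCombs (L - 1).toNat w').map (fun c => c ++ [z]))).foldl
            PySem.Set.add acc) := by
  intro ls
  induction ls with
  | nil => intro acc _ _; rfl
  | cons L t ih =>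
    intro acc h1 h2
    simp only [List.flatMap_cons, List.foldl_append]
    have hL : L.toNat = (L - 1).toNat + 1 := by
      have := h1 L (List.mem_cons_self ..); omega
    have hstep := pv_comb_step z w' (L - 1).toNat (fun c => c) acc
      (by rw [← hL]; exact h2 L (List.mem_cons_self ..))
    rw [hL, hstep]
    exact ih _ (fun L hL => h1 L (List.mem_cons_of_mem _ hL))
      (fun L hL c hc =>
        pv_contains_foldl (fun c => c) _ _ _ (h2 L (List.mem_cons_of_mem _ hL) c hc))

-- head decomposition of a window
theorem pv_win_head (s : List String) (n' j : Nat) (hn : 1 ≤ n') (hj : j < s.length) :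
    pvWin s n' j = s.getD j "" :: pvWin s (n' - 1) (j + 1) := by
  obtain ⟨m, rfl⟩ : ∃ m, n' = m + 1 := ⟨n' - 1, by omega⟩
  unfold pvWin
  rw [List.drop_eq_getElem_cons hj, List.take_succ_cons]
  simp [List.getD_eq_getElem?_getD, List.getElem?_eq_getElem hj]

-- last-element decomposition of a window
theorem pv_win_last (s : List String) (n' j : Nat) (hn : 1 ≤ n')
    (hlen : j + n' ≤ s.length) :
    pvWin s n' j = pvWin s (n' - 1) j ++ [s.getD (j + n' - 1) ""] := by
  obtain ⟨m, rfl⟩ : ∃ m, n' = m + 1 := ⟨n' - 1, by omega⟩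
  unfold pvWin
  have hm : m < (s.drop j).length := by simp; omega
  have hm2 : j + m < s.length := by omega
  have hidx : j + (m + 1) - 1 = j + m := by omega
  rw [hidx, List.take_add_one, List.getElem?_eq_getElem hm]
  simp [List.getElem_drop, List.getD_eq_getElem?_getD, List.getElem?_eq_getElem hm2]

-- the sliding-window induction: A's accumulated first-occurrence fold over all
-- windows up to k equals B's fold over window 0 plus the incremental streams,
-- and every combination of window k is contained in the accumulator
theorem pv_main (s : List String) (n : Int) (hn : 1 ≤ n) :
    ∀ k : Nat, (k : Int) + n ≤ (s.length : Int) →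
      (((List.range (k + 1)).flatMap (fun j => pvWS s n j)).foldl PySem.Set.add [])
        = ((pvWS s n 0 ++ (List.range k).flatMap (fun j => pvNew s n j)).foldl
            PySem.Set.add [])
      ∧ ∀ L ∈ pvLs n, ∀ c ∈ pvCombs L.toNat (pvWin s n.toNat k),
          (((List.range (k + 1)).flatMap (fun j => pvWS s n j)).foldl
              PySem.Set.add []).contains c = true := by
  intro k
  induction k with
  | zero =>
    intro _
    refine ⟨by simp, ?_⟩
    intro L hL c hc
    have hm : c ∈ (List.range 1).flatMap (fun j => pvWS s n j) := by
      simp only [List.range_one, List.flatMap_cons, List.flatMap_nil, List.append_nil]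
      exact List.mem_flatMap.mpr ⟨L, hL, hc⟩
    exact pv_contains_foldl_self (fun c => c) _ [] c hm
  | succ k ih =>
    intro h
    have hk : (k : Int) + n ≤ (s.length : Int) := by omega
    obtain ⟨hEq, hInv⟩ := ih hk
    have hn1 : 1 ≤ n.toNat := by omega
    have hcast : ((n.toNat : Nat) : Int) = n := by omega
    have hlen : k + 1 + n.toNat ≤ s.length := by omega
    have hwlast : pvWin s n.toNat (k + 1)
        = pvWin s (n.toNat - 1) (k + 1) ++ [s.getD (k + 1 + n.toNat - 1) ""] :=
      pv_win_last s n.toNat (k + 1) hn1 hlen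
    have hwhead : pvWin s n.toNat k
        = s.getD k "" :: pvWin s (n.toNat - 1) (k + 1) :=
      pv_win_head s n.toNat k hn1 (by omega)
    have hz : PySem.List.pyGetD s (n + (k : Int)) "" = s.getD (k + 1 + n.toNat - 1) "" := by
      have he : n + (k : Int) = ((n.toNat + k : Nat) : Int) := by omega
      rw [he, PySem.List.pyGetD_natCast]
      congr 1
      omega
    have hstep : ∀ acc : List (List String),
        (∀ L ∈ pvLs n, ∀ c ∈ pvCombs L.toNat (pvWin s n.toNat k), acc.contains c = true) →
        (pvWS s n (k + 1)).foldl PySem.Set.add acc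
          = (pvNew s n k).foldl PySem.Set.add acc := by
      intro acc hacc
      unfold pvWS pvNew
      rw [hwlast]
      rw [pv_window_step (s.getD (k + 1 + n.toNat - 1) "") (pvWin s (n.toNat - 1) (k + 1))
        (pvLs n) acc
        (fun L hL => (PySem.List.mem_pyRange_one.mp hL).1)
        (fun L hL c hc => hacc L hL c (by
          rw [hwhead]
          exact pv_mem_combs_cons (s.getD k "") L.toNat _ c hc))]
      rw [hz]
    have hrange : List.range (k + 1 + 1) = List.range (k + 1) ++ [k + 1] := List.range_succ
    have hrange' : List.range (k + 1) = List.range k ++ [k] := List.range_succ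
    constructor
    · rw [hrange]
      simp only [List.flatMap_append, List.flatMap_cons, List.flatMap_nil, List.append_nil,
        List.foldl_append]
      rw [hstep _ hInv]
      conv_rhs => rw [hrange']
      simp only [List.flatMap_append, List.flatMap_cons, List.flatMap_nil, List.append_nil,
        List.foldl_append]
      rw [List.foldl_append] at hEq
      rw [hEq]
    · intro L hL c hc
      rw [hrange]
      simp only [List.flatMap_append, List.flatMap_cons, List.flatMap_nil, List.append_nil,
        List.foldl_append]
      have hm : c ∈ pvWS s n (k + 1) := List.mem_flatMap.mpr ⟨L, hL, hc⟩
      exact pv_contains_foldl_self (fun c => c) _ _ c hm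

theorem pv_foldl_flatMap {α β γ : Type} (g : α → List γ) (f : β → γ → β) :
    ∀ (xs : List α) (init : β),
      ((xs.flatMap g).foldl f init) = xs.foldl (fun a x => (g x).foldl f a) init
  | [], _ => rfl
  | x :: xs, init => by
      simp only [List.flatMap_cons, List.foldl_append, List.foldl_cons]
      exact pv_foldl_flatMap g f xs _

-- A's inline membership-append step is exactly PySem.Set.add
theorem pv_step_eq_add (acc : List (List String)) (c : List String) :
    (if !(acc.contains c) then acc ++ [c] else acc) = PySem.Set.add acc c := by
  simp [PySem.Set.add, PySem.Set.contains, ite_not]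

-- A's long branch as a single first-occurrence fold over its flattened stream
theorem pvA_flat (s : List String) (n : Int) :
    (PySem.List.pyRange 0 ((s.length : Int) - n + 1) 1).foldl
      (fun wc i => (PySem.List.pyRange 1 (n + 1) 1).foldl
        (fun wc L => (pvCombs L.toNat (PySem.List.slice s (some i) (some (i + n)))).foldl
          (fun wc subset => if !(wc.contains subset) then wc ++ [subset] else wc) wc) wc) []
    = ((PySem.List.pyRange 0 ((s.length : Int) - n + 1) 1).flatMap
        (fun i => (PySem.List.pyRange 1 (n + 1) 1).flatMap
          (fun L => pvCombs L.toNat (PySem.List.slice s (some i) (some (i + n)))))).foldl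
        PySem.Set.add [] := by
  rw [pv_foldl_flatMap]
  congr 1
  funext wc i
  rw [pv_foldl_flatMap]
  congr 1
  funext a L
  congr 1
  funext x y
  exact pv_step_eq_add x y

-- ===== VERDICT (by name: the statement is the Claim_ definition above) =====
theorem get_word_combinations_spec : Claim_equal_get_word_combinations := by
  intro s n _
  show get_word_combinations s n = get_word_combinations_alt s n
  unfold get_word_combinations get_word_combinations_alt
  by_cases hsh : (s.length : Int) ≤ n
  · simp only [if_pos hsh]
    rw [PySem.List.foldl_append_eq_flatMap]
    simp
  · simp only [if_neg hsh]
    by_cases hpos : 1 ≤ n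
    · -- the genuine sliding-window case
      have hcast : ((n.toNat : Nat) : Int) = n := by omega
      have hm1 : ((s.length : Int) - n + 1).toNat = ((s.length : Int) - n).toNat + 1 := by omega
      have hcnt : (((s.length : Int) - n + 1) - 0).toNat = ((s.length : Int) - n).toNat + 1 := by
        omega
      have hIr : PySem.List.pyRange 0 ((s.length : Int) - n + 1) 1
          = (List.range (((s.length : Int) - n).toNat + 1)).map (fun (j : Nat) => (j : Int)) := by
        rw [PySem.List.pyRange_one, hcnt]
        simp only [zero_add]
      have hEr : PySem.List.pyRange n (s.length : Int) 1
          = (List.range (((s.length : Int) - n).toNat)).map (fun (k : Nat) => n + (k : Int)) := by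
        rw [PySem.List.pyRange_one]
      have hwinA : ∀ j : Nat, PySem.List.slice s (some ((j : Nat) : Int))
          (some (((j : Nat) : Int) + n)) = pvWin s n.toNat j := by
        intro j
        rw [← hcast, PySem.List.slice_natCast_add]
        rfl
      have hwinB : ∀ k : Nat, PySem.List.slice s (some (n + (k : Int) - n + 1))
          (some (n + (k : Int))) = pvWin s (n.toNat - 1) (k + 1) := by
        intro k
        have h1 : n + (k : Int) - n + 1 = ((k + 1 : Nat) : Int) := by push_cast; ring
        have h2 : n + (k : Int) = ((k + 1 : Nat) : Int) + ((n.toNat - 1 : Nat) : Int) := by omega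
        rw [h1, h2, PySem.List.slice_natCast_add]
        rfl
      have hraw0 : PySem.List.slice s none (some n) = pvWin s n.toNat 0 := by
        rw [PySem.List.slice_to s (by omega : (0 : Int) ≤ n)]
        simp [pvWin]
      rw [pvA_flat]
      simp only [PySem.List.foldl_append_singleton_eq_map, PySem.List.foldl_append_eq_flatMap,
        PySem.List.dedup_eq_ofList, PySem.Set.ofList_eq_foldl]
      rw [hIr, hEr]
      simp only [List.flatMap_map, hwinA, hwinB, hraw0]
      have hmain := (pv_main s n hpos (((s.length : Int) - n).toNat) (by omega)).1
      unfold pvWS pvNew pvLs at hmain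
      exact hmain
    · -- degenerate n ≤ 0: range(1, n+1) is empty, both sides are []
      have hLs : PySem.List.pyRange 1 (n + 1) 1 = [] :=
        PySem.List.pyRange_one_eq_nil (by omega)
      simp [hLs, PySem.List.dedup_eq_ofList]
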